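-- pv_equiv track=rewrite | github.com/chrisemerson/adventOfCode | 2017-Python/day15/day15.py | gen_a_pt2
-- ===== SOURCE A (Python) =====
-- def gen_a_pt2(start, number):
--     val = start
--     count = 0
--
--     while count < number:
--         val = (val * 16807) % 2147483647
--
--         if val % 4 == 0:
--             yield val
--             count += 1
-- ===== SOURCE B (Python) =====
-- def gen_a_pt2(start, number):
--     # staged pipeline: generate raw LCG values in fixed-size blocks, filter each
--     # block for multiples of 4, accumulate, then truncate to the first `number`.
--     p = 2147483647
--     out = []
--     val = start
--     while len(out) < number:
--         block = []
--         for _ in range(4096):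
--             val = val * 16807 % p
--             block.append(val)
--         out += [v for v in block if v % 4 == 0]
--     yield from out[:number]
-- ===== Notes on version B (the rewrite author's own statement) =====
-- stated objective: alternative
-- what changed: A's fused loop that steps the LCG, tests divisibility and yields with a counter is replaced by a staged pipeline: generate raw LCG values in fixed 4096-value blocks, filter each block with a comprehension, accumulate the filtered values, and finally truncate the collected list to the first `number` elements.
import Mathlib
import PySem

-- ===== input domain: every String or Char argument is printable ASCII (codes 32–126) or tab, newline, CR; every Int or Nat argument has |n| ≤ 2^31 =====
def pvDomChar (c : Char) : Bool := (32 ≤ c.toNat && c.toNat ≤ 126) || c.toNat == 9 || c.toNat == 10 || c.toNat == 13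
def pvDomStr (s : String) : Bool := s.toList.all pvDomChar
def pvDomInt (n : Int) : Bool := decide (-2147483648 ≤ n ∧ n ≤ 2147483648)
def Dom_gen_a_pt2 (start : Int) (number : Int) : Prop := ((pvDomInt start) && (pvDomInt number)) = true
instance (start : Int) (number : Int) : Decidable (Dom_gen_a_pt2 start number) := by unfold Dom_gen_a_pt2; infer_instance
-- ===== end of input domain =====

-- B replaces A's fused generate-test-yield loop by a staged pipeline — generate raw LCG values in 4096-blocks, filter each block for multiples of 4, accumulate, truncate to the first `number` — same cost, different decomposition.


-- ===== PORT A =====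
-- A's while-loop, fuel-bounded structural recursion over the SAME state (val, count, yielded list).
-- Fuel counts raw LCG steps; it is always sufficient on inputs that actually arise (the orbit of this
-- LCG reaches a multiple of 4 well within its period), so the fuel-exhausted case is never the result.
def gen_a_pt2_loop (number : Int) : Nat → Int → Int → List Int → List Int
  | 0, _, _, acc => acc.reverse
  | f + 1, val, count, acc =>
    if count < number then
      let v := PySem.Int.mod (val * 16807) 2147483647
      if PySem.Int.mod v 4 = 0 then
        gen_a_pt2_loop number f v (count + 1) (v :: acc)
      else
        gen_a_pt2_loop number f v count acc
    else acc.reverse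

def fuelA (number : Int) : Nat := number.toNat * 2147483647

def gen_a_pt2 (start : Int) (number : Int) : List Int :=
  gen_a_pt2_loop number ((fuelA start.natAbs + fuelA number) * 4096) start 0 []

-- ===== PORT B =====
-- Source B's inner `for _ in range(4096)` block generator: steps the LCG 4096 times appending each value.
def gen_a_pt2_chunk : Nat → Int → List Int → Int × List Int
  | 0, val, block => (val, block)
  | n + 1, val, block =>
    let v := PySem.Int.mod (val * 16807) 2147483647
    gen_a_pt2_chunk n v (block ++ [v])

-- Source B's outer while-loop: keep appending the filtered block until enough multiples are collected.
def gen_a_pt2_alt_loop (number : Int) : Nat → Int → List Int → List Int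
  | 0, _, out => out
  | f + 1, val, out =>
    if (out.length : Int) < number then
      let r := gen_a_pt2_chunk 4096 val []
      gen_a_pt2_alt_loop number f r.1 (out ++ r.2.filter (fun v => PySem.Int.mod v 4 == 0))
    else out

-- out[:number] is PySem.List.slice out none (some number)
def gen_a_pt2_alt (start : Int) (number : Int) : List Int :=
  PySem.List.slice (gen_a_pt2_alt_loop number (fuelA start.natAbs + fuelA number) start []) none (some number)

-- ===== PRECONDITION & SPEC =====
def Spec_gen_a_pt2 (start : Int) (number : Int) (out : List Int) : Prop := out = gen_a_pt2_alt start number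
instance (start : Int) (number : Int) (out : List Int) : Decidable (Spec_gen_a_pt2 start number out) := by unfold Spec_gen_a_pt2; infer_instance

-- ===== CLAIM (what is proved, stated in full; the proofs are below) =====
def Claim_equal_gen_a_pt2 : Prop := ∀ (start : Int) (number : Int), Dom_gen_a_pt2 start number → Spec_gen_a_pt2 start number (gen_a_pt2 start number)

-- ===== LEMMAS AND PROOFS =====

-- The raw LCG stream of the next n values, and the value after n steps.
def lcgStream : Nat → Int → List Int
  | 0, _ => []
  | n + 1, v =>
    let v' := PySem.Int.mod (v * 16807) 2147483647
    v' :: lcgStream n v'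

def lcgIter : Nat → Int → Int
  | 0, v => v
  | n + 1, v => lcgIter n (PySem.Int.mod (v * 16807) 2147483647)

theorem lcgStream_add (m n : Nat) : ∀ v : Int,
    lcgStream (m + n) v = lcgStream m v ++ lcgStream n (lcgIter m v) := by
  induction m with
  | zero => intro v; simp [lcgStream, lcgIter]
  | succ m ih =>
    intro v
    have h : m + 1 + n = (m + n) + 1 := by omega
    rw [h, lcgStream, lcgStream, lcgIter]
    simp [ih]

theorem chunk_eq (n : Nat) : ∀ (v : Int) (block : List Int),
    gen_a_pt2_chunk n v block = (lcgIter n v, block ++ lcgStream n v) := by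
  induction n with
  | zero => intro v block; simp [gen_a_pt2_chunk, lcgIter, lcgStream]
  | succ n ih =>
    intro v block
    rw [gen_a_pt2_chunk, lcgIter, lcgStream]
    simp [ih]

-- A's loop yields the first (number - count) multiples of 4 of the raw stream.
theorem loopA_eq (number : Int) (f : Nat) : ∀ (val count : Int) (acc : List Int),
    gen_a_pt2_loop number f val count acc =
      acc.reverse ++ ((lcgStream f val).filter (fun v => PySem.Int.mod v 4 == 0)).take (number - count).toNat := by
  induction f with
  | zero => intro val count acc; simp [gen_a_pt2_loop, lcgStream]
  | succ f ih =>
    intro val count acc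
    rw [gen_a_pt2_loop, lcgStream]
    by_cases hc : count < number
    · simp only [hc, if_true, List.filter_cons]
      by_cases h4 : PySem.Int.mod (PySem.Int.mod (val * 16807) 2147483647) 4 = 0
      · have hb : (PySem.Int.mod (PySem.Int.mod (val * 16807) 2147483647) 4 == 0) = true := by
          rw [beq_iff_eq]; exact h4
        simp only [h4, if_true]
        rw [ih, if_pos (show ((0:Int) == 0) = true from rfl)]
        have ht : (number - count).toNat = (number - (count + 1)).toNat + 1 := by omega
        rw [ht, List.take_succ_cons]
        simp
      · have hb : (PySem.Int.mod (PySem.Int.mod (val * 16807) 2147483647) 4 == 0) = false := by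
          rw [beq_eq_false_iff_ne]; exact h4
        simp only [h4, if_false]
        rw [ih, hb, if_neg Bool.false_ne_true]
    · simp only [hc, if_false]
      have h0 : (number - count).toNat = 0 := by omega
      simp [h0]

-- Truncated to `number`, B's loop is the truncated filter of the raw stream it has generated.
theorem loopB_take (number : Int) (f : Nat) : ∀ (val : Int) (out : List Int),
    (gen_a_pt2_alt_loop number f val out).take number.toNat =
      (out ++ ((lcgStream (f * 4096) val).filter (fun v => PySem.Int.mod v 4 == 0))).take number.toNat := by
  induction f with
  | zero => intro val out; simp [gen_a_pt2_alt_loop, lcgStream]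
  | succ f ih =>
    intro val out
    rw [gen_a_pt2_alt_loop]
    by_cases hc : ((out.length : Int)) < number
    · simp only [hc, if_true, chunk_eq]
      rw [ih]
      have hm : (f + 1) * 4096 = 4096 + f * 4096 := by ring
      rw [hm, lcgStream_add]
      simp [List.filter_append, List.append_assoc]
    · simp only [hc, if_false]
      have hlen : number.toNat ≤ out.length := by omega
      rw [List.take_append_of_le_length hlen]

-- both loops drained with number ≤ 0 give []
theorem loopA_nonpos (number : Int) (hn : number ≤ 0) (f : Nat) (val : Int) :
    gen_a_pt2_loop number f val 0 [] = [] := by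
  cases f with
  | zero => simp [gen_a_pt2_loop]
  | succ f =>
    rw [gen_a_pt2_loop]
    have : ¬ ((0 : Int) < number) := by omega
    simp [this]

theorem loopB_nonpos (number : Int) (hn : number ≤ 0) (f : Nat) (val : Int) :
    gen_a_pt2_alt_loop number f val [] = [] := by
  cases f with
  | zero => rfl
  | succ f =>
    rw [gen_a_pt2_alt_loop, if_neg (by simp only [List.length_nil, Nat.cast_zero]; omega)]

-- ===== VERDICT (by name: the statement is the Claim_ definition above) =====
theorem gen_a_pt2_spec : Claim_equal_gen_a_pt2 := by
  intro start number _
  unfold Spec_gen_a_pt2 gen_a_pt2 gen_a_pt2_alt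
  by_cases hn : 0 ≤ number
  · have hnum : ((number.toNat : Int)) = number := Int.toNat_of_nonneg hn
    have hslice := PySem.List.slice_to_natCast
      (gen_a_pt2_alt_loop number (fuelA start.natAbs + fuelA number) start []) number.toNat
    rw [hnum] at hslice
    rw [hslice, loopB_take, loopA_eq, List.nil_append, Int.sub_zero, List.reverse_nil,
        List.nil_append]
  · rw [loopA_nonpos number (by omega), loopB_nonpos number (by omega)]
    simp [PySem.List.slice]
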